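/- PORTED by tools/port_fixed.py from Prog/Jsmn/S/PrimLoop.lean to THE FIXED IMAGE fixed/jsmn_s.bin (same bytes at the same addresses; binFS). Do not edit: edit the original and port again. -/
/-
  jsmn_s.bin (-DJSMN_STRICT -DJSMN_PARENT_LINKS): `jsmn_parse_primitive` (198 bytes at 10008EH, 70 instructions), first part: the prologue and the scanning loop.
    prim_prologue   10008EH → loop head 1000B9H                                  (9 instructions)
    prim_bodyA      1000B9H → found 1000E8H | JSMN_ERROR_PART 100133H | range check 1000ACH    (the loop test and the `switch`: 24 instructions)
    prim_bodyB      1000ACH → JSMN_ERROR_INVAL 10012AH | loop head 1000B9H       (5 instructions)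
  Between the cut points the state is described by `PrimFrame` (what stays true up to the `ret`: saved registers, stack slots, the parser
  and the tokens in memory, the footprint) and `PrimRegs` (the registers that hold the arguments during the loop).
-/
import Prog.Jsmn.Fixed.Specs
import Prog.Jsmn.State
import Prog.Jsmn.Fixed.CodeFS
import X86.Derived.Prog.MemWords
import Prog.Jsmn.D.PrimLemmas

namespace X86
namespace J6
namespace FS
open X86.User (CodeAt RegsKept Span FlagsOK Layout toNat_add_ofNat toNat_ofNat_lt' add_ofNat_add)
open Jsmn JsmnFSBytes

set_option maxRecDepth 100000
set_option maxHeartbeats 4000000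
set_option linter.unusedSimpArgs false
set_option linter.unusedVariables false

/-- What holds from the end of the prologue to the epilogue: rbx = parser, ebp = start, the three pushed registers (r12, rbp, rbx) in their slots; r12 itself is free: it holds the token pointer after the allocation, the return
address, the image; the parser struct holds `pc` and the token array `tc` (the CURRENT model state; `p`, `toks` are those on entry);
nothing was written outside the contract's windows. -/
structure PrimFrame (v0 : User.State) (ret pa tb : Word) (numTokens : Nat) (p : Parser) (toks : Option Tokens) (pc : Parser)
    (tc : Option Tokens) (v : User.State) : Prop where
  rbx : v.reg .rbx = pa
  rbp : v.reg .rbp = UInt64.ofNat p.pos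
  rsp : v.reg .rsp = v0.reg .rsp - 24
  r13 : v.reg .r13 = v0.reg .r13
  r14 : v.reg .r14 = v0.reg .r14
  r15 : v.reg .r15 = v0.reg .r15
  slotR12 : UInt64.ofNat (v.mem.readLE (v0.reg .rsp - 8) 8) = v0.reg .r12
  slotRbp : UInt64.ofNat (v.mem.readLE (v0.reg .rsp - 16) 8) = v0.reg .rbp
  slotRbx : UInt64.ofNat (v.mem.readLE (v0.reg .rsp - 24) 8) = v0.reg .rbx
  retA : UInt64.ofNat (v.mem.readLE (v0.reg .rsp) 8) = ret
  img : CodeAt v.mem 0x100000 image_bytes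
  parser : ParserAt v.mem pa pc
  toksArg : ToksArg Config.strictLinks v.mem tb numTokens tc
  tcb : toksBytes Config.strictLinks numTokens tc = toksBytes Config.strictLinks numTokens toks
  same : SameOutside v0.mem v.mem
    [((v0.reg .rsp).toNat - 32, (v0.reg .rsp).toNat), (pa.toNat, pa.toNat + 12),
      (tb.toNat, tb.toNat + toksBytes Config.strictLinks numTokens toks)]

/-- The argument registers during the loop: rdi = len, r8 = num_tokens, r9 = js, r10 = tokens; the text is in memory. -/
structure PrimRegs (jsA tb : Word) (js : List UInt8) (numTokens : Nat) (v : User.State) : Prop where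
  rdi : v.reg .rdi = UInt64.ofNat js.length
  r8 : v.reg .r8 = UInt64.ofNat numTokens
  r9 : v.reg .r9 = jsA
  r10 : v.reg .r10 = tb
  text : CodeAt v.mem jsA js

variable {n : User.Layout} {v0 : User.State} {ret pa jsA tb : Word} {js : List UInt8} {numTokens : Nat} {p pc : Parser} {toks tc : Option Tokens}

/-- `PrimFrame` after instructions that wrote only scratch registers. -/
theorem PrimFrame.regs {v v' : User.State} (h : PrimFrame v0 ret pa tb numTokens p toks pc tc v) (hk : RegsKept [.rax, .rcx, .rdx, .rsi] v v')
    (hm : v'.mem = v.mem) : PrimFrame v0 ret pa tb numTokens p toks pc tc v' :=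
  ⟨(hk.get .rbx rfl).trans h.rbx, (hk.get .rbp rfl).trans h.rbp, (hk.get .rsp rfl).trans h.rsp,
    (hk.get .r13 rfl).trans h.r13, (hk.get .r14 rfl).trans h.r14, (hk.get .r15 rfl).trans h.r15, hm ▸ h.slotR12, hm ▸ h.slotRbp, hm ▸ h.slotRbx, hm ▸ h.retA,
    hm ▸ h.img, hm ▸ h.parser, hm ▸ h.toksArg, h.tcb, hm ▸ h.same⟩

/-- `PrimRegs` after instructions that wrote only scratch registers. -/
theorem PrimRegs.regs {v v' : User.State} (h : PrimRegs jsA tb js numTokens v) (hk : RegsKept [.rax, .rcx, .rdx, .rsi] v v')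
    (hm : v'.mem = v.mem) : PrimRegs jsA tb js numTokens v' :=
  ⟨(hk.get .rdi rfl).trans h.rdi, (hk.get .r8 rfl).trans h.r8, (hk.get .r9 rfl).trans h.r9, (hk.get .r10 rfl).trans h.r10, hm ▸ h.text⟩

/-- The prologue: push r12, rbp, rbx; the arguments moved to rbx, r9, rdi, r10; `start = parser->pos` in ebp. -/
theorem prim_prologue (hp : ScanPre binFS n binFS.prim binFS.usePrim v0 ret pa jsA tb js numTokens p toks)
    (hr8 : v0.reg .r8 = UInt64.ofNat numTokens) :
    Reach n v0 (fun v => v.rip = 0x1000b9 ∧ PrimFrame v0 ret pa tb numTokens p toks p toks v ∧ PrimRegs jsA tb js numTokens v) := by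
  have hW := hp.toksW
  v3_open hp hW
  j6f_bin
  have hcode := JsmnFS.tjfs_jsmn_parse_primitive_code hp_call_img
  v3_walk hcode hp.call.fetch [] until [0x1000b9]
  have hplt : p.pos < 2 ^ 32 := hp_parser_pos ▸ User.Mem.readLE4_lt _ _
  rw [Word.low32_ofNat_of_lt hplt]
  refine Reach.done ⟨by simp, ?_, ?_⟩
  · exact ⟨by v3_regnorm, by v3_regnorm, by v3_regnorm, by v3_regnorm, by v3_regnorm, by v3_regnorm, by v3_read, by v3_read, by v3_read,
      by v3_frame hp_call_retAddr, by v3_frame hp_call_img, by v3_frame hp.parser, by v3_frame hp_toksArg, rfl, by v3_same⟩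
  · exact ⟨by v3_regnorm, by v3_regnorm; exact hr8, by v3_regnorm, by v3_regnorm, by v3_frame hp_text⟩

/-- Bit `c` of the mask 100100002600H, as the machine tests it (`movabs rsi, mask ; shr rsi, cl ; test sil, 1`). -/
theorem bit_test (c : Nat) (h0 : 0 < c) (hc : c < 64) :
    UInt64.toNat ((Word.shift .shr .w64 0x100100002600 (Word.low .w8 (UInt64.ofNat c))) &&& 1) % 256 =
      (0x100100002600 >>> c) % 2 := by
  have hk : (Word.low .w8 (UInt64.ofNat c) &&& 0x3F).toNat = c := by
    have h1 : (Word.low .w8 (UInt64.ofNat c)).toNat = c := by word_omega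
    rw [UInt64.toNat_and, h1]
    show c &&& 63 = c
    exact Nat.and_two_pow_sub_one_eq_mod c 6 ▸ Nat.mod_eq_of_lt hc
  rw [Word.shift_shr64_val _ _ c hk h0 hc, UInt64.toNat_and, UInt64.toNat_shiftRight]
  have h2 : (UInt64.ofNat c).toNat % 64 = c := by word_omega
  rw [h2]
  show ((0x100100002600 >>> c) &&& 1) % 256 = _
  rw [Nat.and_one_is_mod]
  omega

/-- The bits of the mask: tab, LF, CR, space, comma. -/
theorem mask_bits : ∀ c, c < 64 → ((0x100100002600 >>> c) % 2 = 1 ↔ (c = 9 ∨ c = 10 ∨ c = 13 ∨ c = 32 ∨ c = 44)) := by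
  decide

/-- The loop test and the `switch`, from the loop head with `parser->pos = q`: `found` is reached (the character stops the primitive), or the
loop test failed (100133H: strict mode answers JSMN_ERROR_PART), or the range check is reached, with the character in ecx. Only scratch
registers change. -/
theorem prim_bodyA (hp : ScanPre binFS n binFS.prim binFS.usePrim v0 ret pa jsA tb js numTokens p toks) {q : Nat} {v : User.State}
    (hrip : v.rip = 0x1000b9) (hf : PrimFrame v0 ret pa tb numTokens p toks { p with pos := q } tc v) (hr : PrimRegs jsA tb js numTokens v) :
    Reach n v (fun v' => RegsKept [.rax, .rcx, .rdx, .rsi] v v' ∧ v'.mem = v.mem ∧ v'.reg .rax = UInt64.ofNat q ∧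
      ((v'.rip = 0x1000e8 ∧ more js q = true ∧ primStop Config.strictLinks (charAt js q) = true) ∨
       (v'.rip = 0x100133 ∧ more js q = false) ∨
       (v'.rip = 0x1000ac ∧ v'.reg .rcx = UInt64.ofNat (charAt js q).toNat ∧ more js q = true ∧
         primStop Config.strictLinks (charAt js q) = false))) := by
  have hjs := hp.env.jsR
  have hpr := hp.env.parserR
  v3_open hp.call hp.jslt hf.rbx hf.img hf.parser hr hjs hpr
  j6f_bin
  have hcode := JsmnFS.tjfs_jsmn_parse_primitive_code hf_img
  have hqlt : q < 2 ^ 32 := hf_parser_pos ▸ User.Mem.readLE4_lt _ _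
  have hlq := Word.low32_ofNat_of_lt (n := q) hqlt
  by_cases hq : q < js.length
  · have hch := text_read hr_text q hq
    obtain ⟨c, hc⟩ : ∃ c, c = (charAt js q).toNat := ⟨_, rfl⟩
    have hclt : c < 256 := hc ▸ (charAt js q).toNat_lt
    rw [← hc] at hch ⊢
    have hlc := Word.low32_ofNat_of_lt (n := c) (by omega)
    have hlc8 : Word.low .w8 (UInt64.ofNat c) = UInt64.ofNat c := by word_omega
    v3_walk hcode hp.call.fetch [hlq, hlc, hlc8] until [0x1000e8, 0x1000ac, 0x100133]
    · exact Reach.done ⟨by v3_kept, by simp, by v3_regnorm, Or.inr (Or.inl ⟨by simp, more_false_of_nul (by rw [← hc]; v3_omega)⟩)⟩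
    all_goals have hmore := more_true hq (by rw [← hc]; v3_omega)
    · exact Reach.done ⟨by v3_kept, by simp, by v3_regnorm, Or.inl ⟨by simp, hmore, (primStop_strict_iff _).mpr (by rw [← hc]; v3_omega)⟩⟩
    · exact Reach.done ⟨by v3_kept, by simp, by v3_regnorm, Or.inl ⟨by simp, hmore, (primStop_strict_iff _).mpr (by rw [← hc]; v3_omega)⟩⟩
    · exact Reach.done ⟨by v3_kept, by simp, by v3_regnorm,
        Or.inr (Or.inr ⟨by simp, by v3_regnorm, hmore, primStop_strict_not _ (by rw [← hc]; v3_omega)⟩)⟩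
    · exact Reach.done ⟨by v3_kept, by simp, by v3_regnorm,
        Or.inr (Or.inr ⟨by simp, by v3_regnorm, hmore, primStop_strict_not _ (by rw [← hc]; v3_omega)⟩)⟩
    all_goals have hc9 : 9 ≤ c ∧ c ≤ 44 := by v3_omega
    all_goals have hb := bit_test c (by omega) (by omega)
    all_goals rw [hlc8] at hb
    all_goals have hmb := mask_bits c (by omega)
    all_goals rw [hb] at hbr_1000e6
    · exact Reach.done ⟨by v3_kept, by simp, by v3_regnorm,
        Or.inr (Or.inr ⟨by simp, by v3_regnorm, hmore, primStop_strict_not _ (by rw [← hc]; omega)⟩)⟩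
    · exact Reach.done ⟨by v3_kept, by simp, by v3_regnorm, Or.inl ⟨by simp, hmore, (primStop_strict_iff _).mpr (by rw [← hc]; omega)⟩⟩
  · have hmore := more_false_of_len (js := js) (pos := q) (by omega)
    v3_walk hcode hp.call.fetch [hlq] until [0x1000e8, 0x1000ac, 0x100133]
    exact Reach.done ⟨by v3_kept, by simp, by v3_regnorm, Or.inr (Or.inl ⟨by simp, hmore⟩)⟩

/-- The range check and the loop increment, from 1000ACH with the character `c` in ecx and `parser->pos = q` in eax: either the character
is out of range (10012AH, nothing but scratch registers changed), or `parser->pos = q + 1` is stored and the loop head is reached. -/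
theorem prim_bodyB (hp : ScanPre binFS n binFS.prim binFS.usePrim v0 ret pa jsA tb js numTokens p toks) {q c : Nat} {v : User.State}
    (hrip : v.rip = 0x1000ac) (hf : PrimFrame v0 ret pa tb numTokens p toks { p with pos := q } toks v) (hr : PrimRegs jsA tb js numTokens v)
    (hrax : v.reg .rax = UInt64.ofNat q) (hrcx : v.reg .rcx = UInt64.ofNat c) (hc : c < 256) :
    Reach n v (fun v' =>
      (v'.rip = 0x10012a ∧ RegsKept [.rax, .rcx, .rdx, .rsi] v v' ∧ v'.mem = v.mem ∧ (c < 32 ∨ 127 ≤ c)) ∨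
      (v'.rip = 0x1000b9 ∧ PrimFrame v0 ret pa tb numTokens p toks { p with pos := u32 ((q : Int) + 1) } toks v' ∧
        PrimRegs jsA tb js numTokens v' ∧ 32 ≤ c ∧ c < 127)) := by
  have hW := hp.toksW
  v3_open hp hf hr hW
  j6f_bin
  have hcode := JsmnFS.tjfs_jsmn_parse_primitive_code hf_img
  have hqlt : q < 2 ^ 32 := hf_parser_pos ▸ User.Mem.readLE4_lt _ _
  v3_walk hcode hp.call.fetch [] until [0x10012a, 0x1000b9]
  · exact Reach.done (Or.inl ⟨by simp, by v3_kept, by simp, by v3_omega⟩)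
  · have hpos : u32 ((q : Int) + 1) = (Word.low .w32 (UInt64.ofNat q + 1)).toNat := by unfold u32; v3_omega
    refine Reach.done (Or.inr ⟨by simp, ?_, ?_, by v3_omega, by v3_omega⟩)
    · exact ⟨by v3_regnorm; exact hf_rbx, by v3_regnorm; exact hf_rbp, by v3_regnorm; exact hf_rsp, by v3_regnorm; exact hf_r13,
        by v3_regnorm; exact hf_r14, by v3_regnorm; exact hf_r15, by v3_frame hf_slotR12, by v3_frame hf_slotRbp, by v3_frame hf_slotRbx, by v3_frame hf_retA,
        by v3_frame hf_img, ⟨by rw [hpos]; v3_read, by v3_frame hf_parser_toknext, by v3_frame hf_parser_toksuper⟩, by v3_frame hf_toksArg,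
        rfl, by v3_same⟩
    · exact ⟨by v3_regnorm; exact hr_rdi, by v3_regnorm; exact hr_r8, by v3_regnorm; exact hr_r9, by v3_regnorm; exact hr_r10, by v3_frame hr_text⟩

end FS
end J6
end X86
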